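-- pv_equiv track=rewrite | github.com/kdm0320/Min_project | Programmers Coading Test/LV_3/숫자게임.py | solution
-- ===== SOURCE A (Python) =====
-- def solution(A, B):
--     answer = 0
--
--     A.sort()  # 1단계
--     B.sort()
--
--     ai, bi = 0, 0  # 2단계
--     while ai != len(A) and bi != len(B):
--         if B[bi] > A[ai]:
--             answer += 1
--             ai += 1
--             bi += 1
--         else:
--             bi += 1
--
--     return answer
-- ===== SOURCE B (Python) =====
-- def solution(A, B):
--     A.sort()
--     B.sort()
--     m = len(B)
--
--     def beats(k):
--         # the k largest of B pairwise beat the k smallest of A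
--         return all(B[m - k + i] > A[i] for i in range(k))
--
--     # beats is downward closed, so binary-search the largest feasible k
--     lo, hi = 0, min(len(A), m)
--     while lo < hi:
--         mid = (lo + hi + 1) // 2
--         if beats(mid):
--             lo = mid
--         else:
--             hi = mid - 1
--     return lo
-- ===== Notes on version B (the rewrite author's own statement) =====
-- stated objective: alternative
-- what changed: Replaces A's linear greedy two-pointer scan with a binary search over the answer k, using the feasibility predicate 'the k largest of B pairwise beat the k smallest of A' (downward closed), which yields the same maximum matching size.
import Mathlib
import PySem

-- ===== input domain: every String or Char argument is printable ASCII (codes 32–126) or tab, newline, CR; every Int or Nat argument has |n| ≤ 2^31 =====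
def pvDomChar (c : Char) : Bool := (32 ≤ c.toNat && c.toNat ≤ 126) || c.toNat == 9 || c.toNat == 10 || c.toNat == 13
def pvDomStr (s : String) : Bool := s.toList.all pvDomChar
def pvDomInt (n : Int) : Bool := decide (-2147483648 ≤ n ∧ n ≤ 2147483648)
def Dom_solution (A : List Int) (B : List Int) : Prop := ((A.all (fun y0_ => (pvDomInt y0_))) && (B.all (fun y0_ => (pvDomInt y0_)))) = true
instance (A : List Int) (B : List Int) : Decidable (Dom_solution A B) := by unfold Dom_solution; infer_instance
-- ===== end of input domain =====

-- B replaces A's linear greedy scan with a binary search over the answer k, using the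
-- downward-closed feasibility predicate "the k largest of B pairwise beat the k smallest of A";
-- objective: alternative algorithm, same result. Both Pythons sort their arguments in place;
-- the equivalence proved here is about the RETURN value (the mutation is identical in A and B).

-- ===== PORT A =====
-- the while loop: ai/bi start at 0 and only ever grow by 1, so the loop condition
-- `ai != len(A) and bi != len(B)` is equivalently `ai < len(A) and bi < len(B)` (used for termination)
def solutionLoop (as_ bs : List Int) (ai bi : Nat) (answer : Int) : Int :=
  if h : ai < as_.length ∧ bi < bs.length then
    if bs.getD bi 0 > as_.getD ai 0 then
      solutionLoop as_ bs (ai + 1) (bi + 1) (answer + 1)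
    else
      solutionLoop as_ bs ai (bi + 1) answer
  else answer
termination_by bs.length - bi
decreasing_by all_goals omega

def solution (A : List Int) (B : List Int) : Int :=
  let As := PySem.List.sorted A (fun x => x) false   -- A.sort()
  let Bs := PySem.List.sorted B (fun x => x) false   -- B.sort()
  solutionLoop As Bs 0 0 0

-- ===== PORT B =====
-- beats(k) = all(B[m - k + i] > A[i] for i in range(k)); the search only calls it with
-- 1 <= k <= min(len(A), len(B)), so every index is in range and nonnegative: `.getD _.toNat 0`
-- is exactly Python's indexing there
def solutionAltBeats (As Bs : List Int) (m k : Int) : Bool :=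
  (PySem.List.pyRange 0 k 1).all
    (fun i => decide (Bs.getD (m - k + i).toNat 0 > As.getD i.toNat 0))

-- the `while lo < hi` binary-search loop of B
def solutionAltSearch (As Bs : List Int) (m lo hi : Int) : Int :=
  if h : lo < hi then
    let mid := PySem.Int.floordiv (lo + hi + 1) 2
    if solutionAltBeats As Bs m mid then solutionAltSearch As Bs m mid hi
    else solutionAltSearch As Bs m lo (mid - 1)
  else lo
termination_by (hi - lo).toNat
decreasing_by
  all_goals
    have hb := PySem.Int.floordiv_two_mid_bounds (show lo + 1 ≤ hi by omega)
    have harg : lo + 1 + hi = lo + hi + 1 := by ring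
    rw [harg] at hb
    omega

def solution_alt (A : List Int) (B : List Int) : Int :=
  let As := PySem.List.sorted A (fun x => x) false   -- A.sort()
  let Bs := PySem.List.sorted B (fun x => x) false   -- B.sort()
  let m : Int := Bs.length                           -- m = len(B)
  solutionAltSearch As Bs m 0 (min (As.length : Int) m)

-- ===== PRECONDITION & SPEC =====
def Spec_solution (A : List Int) (B : List Int) (out : Int) : Prop := out = solution_alt A B
instance (A : List Int) (B : List Int) (out : Int) : Decidable (Spec_solution A B out) := by unfold Spec_solution; infer_instance

-- ===== CLAIM (what is proved, stated in full; the proofs are below) =====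
def Claim_equal_solution : Prop := ∀ (A : List Int) (B : List Int), Dom_solution A B → Spec_solution A B (solution A B)

-- ===== LEMMAS AND PROOFS =====

-- A's greedy count as plain structural recursion on the two (sorted ascending) lists
def gcount : List Int → List Int → Nat
  | _, [] => 0
  | [], _ :: _ => 0
  | a :: as_, b :: bs => if b > a then gcount as_ bs + 1 else gcount (a :: as_) bs

theorem gcount_nil_right (as_ : List Int) : gcount as_ [] = 0 := by
  cases as_ <;> rfl

-- the index loop of port A computes gcount on the remaining suffixes
theorem solutionLoop_eq_gcount (as_ bs : List Int) (ai bi : Nat) (answer : Int) :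
    solutionLoop as_ bs ai bi answer = answer + (gcount (as_.drop ai) (bs.drop bi) : Int) := by
  by_cases h : ai < as_.length ∧ bi < bs.length
  · obtain ⟨ha, hb⟩ := h
    have hda : as_.drop ai = as_[ai] :: as_.drop (ai + 1) := List.drop_eq_getElem_cons ha
    have hdb : bs.drop bi = bs[bi] :: bs.drop (bi + 1) := List.drop_eq_getElem_cons hb
    have hga : as_.getD ai 0 = as_[ai] := List.getD_eq_getElem as_ 0 ha
    have hgb : bs.getD bi 0 = bs[bi] := List.getD_eq_getElem bs 0 hb
    rw [solutionLoop, dif_pos ⟨ha, hb⟩, hga, hgb, hda, hdb]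
    by_cases hc : bs[bi] > as_[ai]
    · rw [if_pos hc, solutionLoop_eq_gcount, gcount, if_pos hc]
      push_cast
      ring
    · rw [if_neg hc, solutionLoop_eq_gcount, gcount, if_neg hc, ← hda]
  · rw [solutionLoop, dif_neg h]
    rcases not_and_or.mp h with ha | hb
    · have hnil : as_.drop ai = [] := List.drop_eq_nil_of_le (by omega)
      rw [hnil]
      cases hbs : bs.drop bi <;> simp [gcount]
    · have hnil : bs.drop bi = [] := List.drop_eq_nil_of_le (by omega)
      rw [hnil, gcount_nil_right]
      simp
termination_by bs.length - bi
decreasing_by all_goals omega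

-- feasibility: the k smallest of as_ are pairwise beaten by the k largest of bs
def Feas (as_ bs : List Int) (k : Nat) : Prop :=
  k ≤ as_.length ∧ k ≤ bs.length ∧
    ∀ i, i < k → as_.getD i 0 < bs.getD (bs.length - k + i) 0

-- an in-range getD of a sorted list is ≥ its head
theorem head_le_getD (b : Int) (bs : List Int) (hs : (b :: bs).Pairwise (· ≤ ·))
    (j : Nat) (hj : j < bs.length) : b ≤ bs.getD j 0 := by
  rw [List.getD_eq_getElem bs 0 hj]
  exact (List.pairwise_cons.mp hs).1 _ (List.getElem_mem hj)

-- the greedy count is feasible (bs sorted ascending)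
theorem feas_gcount : ∀ (bs as_ : List Int), bs.Pairwise (· ≤ ·) → Feas as_ bs (gcount as_ bs) := by
  intro bs
  induction bs with
  | nil =>
    intro as_ _
    rw [gcount_nil_right]
    exact ⟨Nat.zero_le _, Nat.zero_le _, fun i hi => absurd hi (Nat.not_lt_zero i)⟩
  | cons b bs' ih =>
    intro as_ hs
    cases as_ with
    | nil => exact ⟨Nat.zero_le _, Nat.zero_le _, fun i hi => absurd hi (Nat.not_lt_zero i)⟩
    | cons a as' =>
      have hs' : bs'.Pairwise (· ≤ ·) := (List.pairwise_cons.mp hs).2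
      by_cases hc : b > a
      · rw [show gcount (a :: as') (b :: bs') = gcount as' bs' + 1 from by
          rw [gcount, if_pos hc]]
        obtain ⟨h1, h2, h3⟩ := ih as' hs'
        refine ⟨by simpa using Nat.succ_le_succ h1, by simpa using Nat.succ_le_succ h2, ?_⟩
        intro i hi
        have hlen : (b :: bs').length - (gcount as' bs' + 1) + i
            = bs'.length - gcount as' bs' + i := by
          simp only [List.length_cons]; omega
        rw [hlen]
        cases i with
        | zero =>
          rw [List.getD_cons_zero]
          by_cases he : gcount as' bs' = bs'.length
          · rw [he, Nat.sub_self, Nat.add_zero, List.getD_cons_zero]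
            exact hc
          · have hlt : bs'.length - gcount as' bs' - 1 < bs'.length := by omega
            have hidx : bs'.length - gcount as' bs' + 0
                = (bs'.length - gcount as' bs' - 1) + 1 := by omega
            rw [hidx, List.getD_cons_succ]
            exact lt_of_lt_of_le hc (head_le_getD b bs' hs _ hlt)
        | succ j =>
          have hidx : bs'.length - gcount as' bs' + (j + 1)
              = (bs'.length - gcount as' bs' + j) + 1 := by omega
          rw [hidx, List.getD_cons_succ, List.getD_cons_succ]
          exact h3 j (by omega)
      · rw [show gcount (a :: as') (b :: bs') = gcount (a :: as') bs' from by
          rw [gcount, if_neg hc]]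
        obtain ⟨h1, h2, h3⟩ := ih (a :: as') hs'
        refine ⟨h1, Nat.le_succ_of_le h2, ?_⟩
        intro i hi
        have hidx : (b :: bs').length - gcount (a :: as') bs' + i
            = (bs'.length - gcount (a :: as') bs' + i) + 1 := by
          simp only [List.length_cons]; omega
        rw [hidx, List.getD_cons_succ]
        exact h3 i hi

-- the greedy count dominates every feasible k (no order hypotheses needed)
theorem gcount_max : ∀ (bs as_ : List Int) (k : Nat), Feas as_ bs k → k ≤ gcount as_ bs := by
  intro bs
  induction bs with
  | nil => intro as_ k hf; exact le_trans hf.2.1 (Nat.zero_le _)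
  | cons b bs' ih =>
    intro as_ k hf
    cases as_ with
    | nil => exact le_trans hf.1 (by simp)
    | cons a as' =>
      obtain ⟨h1, h2, h3⟩ := hf
      by_cases hc : b > a
      · rw [show gcount (a :: as') (b :: bs') = gcount as' bs' + 1 from by
          rw [gcount, if_pos hc]]
        cases k with
        | zero => exact Nat.zero_le _
        | succ k' =>
          have hfeas : Feas as' bs' k' := by
            refine ⟨by simpa using h1, by simpa using h2, ?_⟩
            intro j hj
            have hj' := h3 (j + 1) (by omega)
            have hidx : (b :: bs').length - (k' + 1) + (j + 1)
                = (bs'.length - k' + j) + 1 := by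
              simp only [List.length_cons]; omega
            rw [hidx, List.getD_cons_succ, List.getD_cons_succ] at hj'
            exact hj'
          exact Nat.succ_le_succ (ih as' k' hfeas)
      · rw [show gcount (a :: as') (b :: bs') = gcount (a :: as') bs' from by
          rw [gcount, if_neg hc]]
        cases k with
        | zero => exact Nat.zero_le _
        | succ k' =>
          have hk2 : k' + 1 ≤ bs'.length := by
            by_contra hgt
            have hke : k' + 1 = bs'.length + 1 := by simp only [List.length_cons] at h2; omega
            have h0 := h3 0 (Nat.succ_pos k')
            rw [hke] at h0
            simp only [List.length_cons, Nat.sub_self, Nat.add_zero, List.getD_cons_zero] at h0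
            exact hc h0
          have hfeas : Feas (a :: as') bs' (k' + 1) := by
            refine ⟨h1, hk2, ?_⟩
            intro i hi
            have hi' := h3 i hi
            have hidx : (b :: bs').length - (k' + 1) + i
                = (bs'.length - (k' + 1) + i) + 1 := by
              simp only [List.length_cons]; omega
            rw [hidx, List.getD_cons_succ] at hi'
            exact hi'
          exact ih (a :: as') (k' + 1) hfeas

-- in a sorted list getD is monotone in the (in-range) index
theorem getD_mono_of_pairwise (bs : List Int) (hs : bs.Pairwise (· ≤ ·))
    (p q : Nat) (hpq : p ≤ q) (hq : q < bs.length) : bs.getD p 0 ≤ bs.getD q 0 := by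
  rcases Nat.lt_or_ge p q with hlt | hge
  · rw [List.getD_eq_getElem bs 0 (by omega), List.getD_eq_getElem bs 0 hq]
    exact List.pairwise_iff_getElem.mp hs p q (by omega) hq hlt
  · have : p = q := by omega
    rw [this]

-- feasibility is downward closed (bs sorted ascending)
theorem feas_mono (as_ bs : List Int) (hs : bs.Pairwise (· ≤ ·)) (k j : Nat)
    (hf : Feas as_ bs k) (hjk : j ≤ k) : Feas as_ bs j := by
  obtain ⟨h1, h2, h3⟩ := hf
  refine ⟨le_trans hjk h1, le_trans hjk h2, ?_⟩
  intro i hi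
  exact lt_of_lt_of_le (h3 i (by omega))
    (getD_mono_of_pairwise bs hs _ _ (by omega) (by omega))

-- the ported beats(k) decides feasibility for in-range k
theorem beats_iff_feas (As Bs : List Int) (k : Nat)
    (hk1 : k ≤ As.length) (hk2 : k ≤ Bs.length) :
    solutionAltBeats As Bs (Bs.length : Int) (k : Int) = true ↔ Feas As Bs k := by
  unfold solutionAltBeats
  rw [PySem.List.pyRange_zero_nat k, List.all_map, List.all_eq_true]
  constructor
  · intro h
    refine ⟨hk1, hk2, ?_⟩
    intro i hi
    have := h i (List.mem_range.mpr hi)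
    simp only [Function.comp_apply, decide_eq_true_eq] at this
    have hidx : ((Bs.length : Int) - (k : Int) + (i : Int)).toNat = Bs.length - k + i := by
      omega
    have hi' : ((i : Int)).toNat = i := by omega
    rw [hidx, hi'] at this
    exact this
  · intro ⟨_, _, h3⟩ i hmem
    have hi := List.mem_range.mp hmem
    simp only [Function.comp_apply, decide_eq_true_eq]
    have hidx : ((Bs.length : Int) - (k : Int) + (i : Int)).toNat = Bs.length - k + i := by
      omega
    have hi' : ((i : Int)).toNat = i := by omega
    rw [hidx, hi']
    exact h3 i hi

-- the binary-search loop returns c when beats acts as the indicator of k ≤ c on (lo, hi]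
theorem searchAlt_eq (As Bs : List Int) (m lo hi c : Int)
    (hlo : lo ≤ c) (hhi : c ≤ hi)
    (hiff : ∀ k : Int, lo < k → k ≤ hi → (solutionAltBeats As Bs m k = true ↔ k ≤ c)) :
    solutionAltSearch As Bs m lo hi = c := by
  rw [solutionAltSearch]
  by_cases h : lo < hi
  · rw [dif_pos h]
    have hb := PySem.Int.floordiv_two_mid_bounds (show lo + 1 ≤ hi by omega)
    have harg : lo + 1 + hi = lo + hi + 1 := by ring
    rw [harg] at hb
    simp only []
    by_cases hbt : solutionAltBeats As Bs m (PySem.Int.floordiv (lo + hi + 1) 2) = true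
    · rw [if_pos hbt]
      have hmc : PySem.Int.floordiv (lo + hi + 1) 2 ≤ c :=
        (hiff _ (by omega) (by omega)).mp hbt
      exact searchAlt_eq As Bs m _ hi c hmc hhi
        (fun k hk1 hk2 => hiff k (by omega) hk2)
    · rw [if_neg hbt]
      have hmc : c < PySem.Int.floordiv (lo + hi + 1) 2 := by
        by_contra hge
        exact hbt ((hiff _ (by omega) (by omega)).mpr (by omega))
      exact searchAlt_eq As Bs m lo _ c hlo (by omega)
        (fun k hk1 hk2 => hiff k hk1 (by omega))
  · rw [dif_neg h]
    omega
termination_by (hi - lo).toNat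
decreasing_by
  all_goals
    have hb := PySem.Int.floordiv_two_mid_bounds (show lo + 1 ≤ hi by omega)
    have harg : lo + 1 + hi = lo + hi + 1 := by ring
    rw [harg] at hb
    omega

-- sortedness of the ascending sort, specialised to the identity key
theorem sorted_id_pairwise (xs : List Int) :
    (PySem.List.sorted xs (fun x => x) false).Pairwise (· ≤ ·) :=
  PySem.List.sorted_pairwise xs (fun x => x)

-- ===== VERDICT (by name: the statement is the Claim_ definition above) =====
theorem solution_spec : Claim_equal_solution := by
  intro A B _
  unfold Spec_solution solution solution_alt
  simp only []
  set As := PySem.List.sorted A (fun x => x) false with hAs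
  set Bs := PySem.List.sorted B (fun x => x) false with hBs
  have hsB : Bs.Pairwise (· ≤ ·) := sorted_id_pairwise B
  have hfeas := feas_gcount Bs As hsB
  obtain ⟨hg1, hg2, _⟩ := hfeas
  rw [solutionLoop_eq_gcount, List.drop_zero, List.drop_zero, zero_add]
  refine (searchAlt_eq As Bs (Bs.length : Int) 0 (min (As.length : Int) (Bs.length : Int))
      ((gcount As Bs : Nat) : Int) (by omega) (by omega) ?_).symm
  intro k hk1 hk2
  have hk0 : (0 : Int) ≤ k := by omega
  have hkeq : k = ((k.toNat : Nat) : Int) := by omega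
  have hka : k.toNat ≤ As.length := by omega
  have hkb : k.toNat ≤ Bs.length := by omega
  rw [hkeq, beats_iff_feas As Bs k.toNat hka hkb]
  constructor
  · intro hf
    have := gcount_max Bs As k.toNat hf
    omega
  · intro hkc
    exact feas_mono As Bs hsB (gcount As Bs) k.toNat (feas_gcount Bs As hsB) (by omega)
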